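-- pv_equiv track=rewrite | github.com/uedaLabR/tyCooNN | utils/tyUtils.py | getOrNone
-- ===== SOURCE A (Python) =====
-- def getOrNone(groups,partialKey):
--     r = None
--     if groups is None:
--         return None
--     for k in groups:
--         if partialKey in k:
--             r = groups[k]
--     return r
-- ===== SOURCE B (Python) =====
-- def getOrNone(groups, partialKey):
--     if groups is None:
--         return None
--     for k in reversed(groups):
--         if partialKey in k:
--             return groups[k]
--     return None
-- ===== Notes on version B (the rewrite author's own statement) =====
-- stated objective: idiomatic
-- what changed: Replaced the full forward scan that keeps overwriting an accumulator with a reverse-order scan that returns the first (i.e. last forward) matching key's value immediately and needs no accumulator.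
import Mathlib
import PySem

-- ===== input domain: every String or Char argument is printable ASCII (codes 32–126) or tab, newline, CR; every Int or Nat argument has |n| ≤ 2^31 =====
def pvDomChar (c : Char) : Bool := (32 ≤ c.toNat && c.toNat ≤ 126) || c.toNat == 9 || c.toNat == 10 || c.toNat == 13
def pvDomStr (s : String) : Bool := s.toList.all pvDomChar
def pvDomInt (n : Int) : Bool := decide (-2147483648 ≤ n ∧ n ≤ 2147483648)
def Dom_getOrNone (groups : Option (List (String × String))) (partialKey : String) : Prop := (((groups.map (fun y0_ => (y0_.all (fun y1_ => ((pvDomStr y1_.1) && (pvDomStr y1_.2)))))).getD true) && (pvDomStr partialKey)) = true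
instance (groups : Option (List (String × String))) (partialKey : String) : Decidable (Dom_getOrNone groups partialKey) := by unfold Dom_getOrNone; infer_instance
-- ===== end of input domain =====

-- B replaces A's full forward scan with an overwritten accumulator by a reverse scan that returns on the first match (idiomatic; same result on all inputs).


-- ===== PORT A =====
-- dict lookup groups[k]: first pair whose key equals k (never fails here, since k is drawn from groups)
def pyLookup (gs : List (String × String)) (k : String) : Option String :=
  (gs.find? (fun p => p.1 == k)).map Prod.snd

-- r accumulator; 'for k in groups' over keys, 'if partialKey in k: r = groups[k]'
def getOrNone (groups : Option (List (String × String))) (partialKey : String) : Option String :=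
  match groups with
  | none => none
  | some gs =>
    (gs.map Prod.fst).foldl
      (fun r k =>
        if PySem.Str.isIn partialKey k then
          match pyLookup gs k with   -- groups[k]; the none branch is unreachable (k is a key of gs)
          | some v => some v
          | none => r
        else r)
      none

-- ===== PORT B =====
-- reverse scan with early return: first matching key from the back wins
def revScan (gs : List (String × String)) (partialKey : String) : List String → Option String
  | [] => none
  | k :: rest =>
    if PySem.Str.isIn partialKey k then pyLookup gs k else revScan gs partialKey rest

def getOrNone_alt (groups : Option (List (String × String))) (partialKey : String) : Option String :=
  match groups with
  | none => none
  | some gs => revScan gs partialKey (gs.map Prod.fst).reverse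

-- ===== PRECONDITION & SPEC =====
def Spec_getOrNone (groups : Option (List (String × String))) (partialKey : String) (out : Option String) : Prop := out = getOrNone_alt groups partialKey
instance (groups : Option (List (String × String))) (partialKey : String) (out : Option String) : Decidable (Spec_getOrNone groups partialKey out) := by unfold Spec_getOrNone; infer_instance

-- ===== CLAIM (what is proved, stated in full; the proofs are below) =====
def Claim_equal_getOrNone : Prop := ∀ (groups : Option (List (String × String))) (partialKey : String), Dom_getOrNone groups partialKey → Spec_getOrNone groups partialKey (getOrNone groups partialKey)

-- ===== LEMMAS AND PROOFS =====

theorem lookup_isSome (gs : List (String × String)) (k : String) (hk : k ∈ gs.map Prod.fst) :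
    (pyLookup gs k).isSome := by
  unfold pyLookup
  rcases List.mem_map.1 hk with ⟨p, hp, rfl⟩
  have : (gs.find? (fun q => q.1 == p.1)).isSome :=
    List.find?_isSome.2 ⟨p, hp, by simp⟩
  rcases Option.isSome_iff_exists.1 this with ⟨q, hq⟩
  simp [hq]

theorem revScan_append (gs : List (String × String)) (pk : String) (xs ys : List String)
    (hx : ∀ k ∈ xs, k ∈ gs.map Prod.fst) :
    revScan gs pk (xs ++ ys) =
      match revScan gs pk xs with
      | some v => some v
      | none => revScan gs pk ys := by
  induction xs with
  | nil => simp [revScan]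
  | cons a t ih =>
    simp only [List.cons_append, revScan]
    split_ifs with h
    · rcases Option.isSome_iff_exists.1 (lookup_isSome gs a (hx a (by simp))) with ⟨v, hv⟩
      simp [hv]
    · exact ih (fun k hk => hx k (by simp [hk]))

theorem loop_eq (gs : List (String × String)) (pk : String) :
    ∀ (L : List String), (∀ k ∈ L, k ∈ gs.map Prod.fst) → ∀ (r : Option String),
      L.foldl
        (fun r k =>
          if PySem.Str.isIn pk k then
            match pyLookup gs k with
            | some v => some v
            | none => r
          else r) r
      = match revScan gs pk L.reverse with
        | some v => some v
        | none => r := by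
  intro L
  induction L with
  | nil => intro _ r; simp [revScan]
  | cons a t ih =>
    intro hmem r
    have ha : a ∈ gs.map Prod.fst := hmem a (by simp)
    simp only [List.foldl_cons, List.reverse_cons,
      revScan_append gs pk t.reverse [a] (fun k hk => hmem k (by simp [List.mem_reverse.1 hk]))]
    rw [ih (fun k hk => hmem k (by simp [hk]))]
    cases hrev : revScan gs pk t.reverse with
    | some v => rfl
    | none =>
      simp only [revScan]
      rcases Option.isSome_iff_exists.1 (lookup_isSome gs a ha) with ⟨v, hv⟩
      split_ifs with h <;> simp [hv]

-- ===== VERDICT (by name: the statement is the Claim_ definition above) =====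
theorem getOrNone_spec : Claim_equal_getOrNone := by
  intro groups pk _
  unfold Spec_getOrNone getOrNone getOrNone_alt
  cases groups with
  | none => rfl
  | some gs =>
    simp only
    rw [loop_eq gs pk (gs.map Prod.fst) (fun k hk => hk) none]
    cases revScan gs pk (gs.map Prod.fst).reverse <;> rfl
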